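-- pv_equiv track=rewrite | github.com/alabarym/Python3.7-learning | 016_substring_return.py | my_substr
-- ===== SOURCE A (Python) =====
-- def my_substr(string, length):
--     index = 0
--     substring = ''
--     while index < length:
--         current_char = string[index]
--         substring = substring + current_char
--         index = index +1
--     return substring
-- ===== SOURCE B (Python) =====
-- def my_substr(string, length):
--     return string[:length] if length > 0 else ''
-- ===== Notes on version B (the rewrite author's own statement) =====
-- stated objective: faster
-- what changed: Replaces the per-character indexing loop with quadratic string concatenation by a single closed-form slice string[:length] (empty result for non-positive length); Pre_ excludes length > len(string), where A raises IndexError and B returns the clamped slice.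
import Mathlib
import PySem

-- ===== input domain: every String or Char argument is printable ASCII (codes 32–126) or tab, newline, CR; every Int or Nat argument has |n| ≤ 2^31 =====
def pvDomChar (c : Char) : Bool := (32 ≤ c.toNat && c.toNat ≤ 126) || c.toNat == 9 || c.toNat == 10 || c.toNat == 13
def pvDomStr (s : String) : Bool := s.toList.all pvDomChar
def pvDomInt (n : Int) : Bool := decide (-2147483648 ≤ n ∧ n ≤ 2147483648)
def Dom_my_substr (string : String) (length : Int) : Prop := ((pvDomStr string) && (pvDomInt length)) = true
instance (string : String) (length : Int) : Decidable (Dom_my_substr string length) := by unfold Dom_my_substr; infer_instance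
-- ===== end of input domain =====

-- B replaces A's per-character indexing-and-concatenation loop with one closed-form slice string[:length].


-- ===== PORT A =====
-- while index < length: acc += string[index]; index += 1
-- (string[index] out of range is an IndexError in Python: PySem pyGet? returns none there; excluded by Pre_)
def my_substr_loop (cs : List Char) (length : Int) (index : Int) (acc : List Char) : List Char :=
  if _h : index < length then
    match PySem.List.pyGet? cs index with
    | some c => my_substr_loop cs length (index + 1) (acc ++ [c])
    | none => acc
  else acc
termination_by (length - index).toNat
decreasing_by omega

def my_substr (string : String) (length : Int) : String :=
  String.ofList (my_substr_loop string.toList length 0 [])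

-- ===== PORT B =====
def my_substr_alt (string : String) (length : Int) : String :=
  if length > 0 then String.ofList (PySem.List.slice string.toList none (some length)) else ""

-- ===== PRECONDITION & SPEC =====
-- A indexes string[index] for every index < length, so it raises IndexError when length > len(string).
def Pre_my_substr (string : String) (length : Int) : Prop := length ≤ (string.toList.length : Int)
instance (string : String) (length : Int) : Decidable (Pre_my_substr string length) := by unfold Pre_my_substr; infer_instance
def pvWitness_my_substr : String × Int := ("abc", 2)

def Spec_my_substr (string : String) (length : Int) (out : String) : Prop := out = my_substr_alt string length
instance (string : String) (length : Int) (out : String) : Decidable (Spec_my_substr string length out) := by unfold Spec_my_substr; infer_instance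

-- ===== CLAIM (what is proved, stated in full; the proofs are below) =====
def Claim_equal_my_substr : Prop := ∀ (string : String) (length : Int), Dom_my_substr string length → Pre_my_substr string length → Spec_my_substr string length (my_substr string length)

-- ===== LEMMAS AND PROOFS =====
-- For 0 ≤ i ≤ length ≤ len cs, the loop appends to acc the characters cs[i:length].
theorem my_substr_loop_eq (cs : List Char) (L : Int) (i : Nat) (acc : List Char)
    (hiL : (i : Int) ≤ L) (hL : L ≤ (cs.length : Int)) :
    my_substr_loop cs L (i : Int) acc = acc ++ (cs.drop i).take (L.toNat - i) := by
  have hfuel : L.toNat - i + i = L.toNat := by omega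
  generalize hk : L.toNat - i = k at *
  induction k generalizing i acc with
  | zero =>
    have : ¬ ((i : Int) < L) := by omega
    rw [my_substr_loop]
    simp [this]
  | succ k ih =>
    have hlt : (i : Int) < L := by omega
    have hrange : i < cs.length := by omega
    rw [my_substr_loop]
    simp only [hlt, dif_pos]
    have hget : PySem.List.pyGet? cs (i : Int) = some cs[i] := by
      simp [PySem.List.pyGet?_natCast, List.getElem?_eq_getElem hrange]
    rw [hget]
    dsimp only
    have hcast : ((i : Int) + 1) = ((i + 1 : Nat) : Int) := by push_cast; ring
    rw [hcast, ih (i + 1) (acc ++ [cs[i]]) (by omega) (by omega) (by omega)]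
    rw [List.append_assoc]
    congr 1
    have : cs.drop i = cs[i] :: cs.drop (i + 1) := List.drop_eq_getElem_cons hrange
    rw [this]
    rw [List.take_succ_cons]
    simp

-- ===== VERDICT (by name: the statement is the Claim_ definition above) =====
theorem my_substr_spec : Claim_equal_my_substr := by
  intro s L _hDom hPre
  unfold Spec_my_substr my_substr my_substr_alt
  by_cases hpos : L > 0
  · have h0 : (0 : Int) ≤ L := by omega
    have := my_substr_loop_eq s.toList L 0 [] (by exact_mod_cast h0) hPre
    simp only [Nat.cast_zero] at this
    rw [this]
    have hsl := PySem.List.slice_to (xs := s.toList) (b := L) h0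
    simp [hpos, hsl]
  · have hnlt : ¬ ((0 : Int) < L) := by omega
    rw [my_substr_loop]
    simp [hpos]
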